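-- pv_equiv track=rewrite | github.com/AlexDobrushskiy/botfarm | botfarm/project_setup.py | find_projects_insert_point
-- ===== SOURCE A (Python) =====
-- def find_projects_insert_point(lines: list[str]) -> int:
--     """Return the line index after the last content line of the projects section."""
--     in_projects = False
--     last_content_idx = 0
--     for i, line in enumerate(lines):
--         stripped = line.strip()
--
--         if not in_projects:
--             if stripped.startswith("projects:") and not line[0].isspace():
--                 in_projects = True
--                 last_content_idx = i
--             continue
--
--         # Any non-empty, non-indented line that isn't a list item ends the section
--         if stripped and not line[0].isspace() and not stripped.startswith("- "):
--             break
--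
--         # Count content lines as part of the projects section
--         if stripped:
--             last_content_idx = i
--
--     return last_content_idx + 1
-- ===== SOURCE B (Python) =====
-- def find_projects_insert_point(lines: list[str]) -> int:
--     """Comprehension-based: build index lists for headers, terminators and content, then combine."""
--     hdrs = [i for i, l in enumerate(lines)
--             if l.strip().startswith("projects:") and not l[0].isspace()]
--     if not hdrs:
--         return 1
--     h = hdrs[0]
--     body = lines[h + 1:]
--     ends = [j for j, l in enumerate(body)
--             if l.strip() and not l[0].isspace() and not l.strip().startswith("- ")]
--     cut = ends[0] if ends else len(body)
--     content = [j for j, l in enumerate(body[:cut]) if l.strip()]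
--     return (h + 1 + content[-1] + 1) if content else h + 1
-- ===== Notes on version B (the rewrite author's own statement) =====
-- stated objective: alternative
-- what changed: Replaced A's single stateful scan (in_projects flag, break, running last_content_idx) by a declarative computation that builds three index lists via comprehensions (header positions, terminator positions in the tail, content positions in the truncated body, using slicing) and combines their first/last elements arithmetically.
import Mathlib
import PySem

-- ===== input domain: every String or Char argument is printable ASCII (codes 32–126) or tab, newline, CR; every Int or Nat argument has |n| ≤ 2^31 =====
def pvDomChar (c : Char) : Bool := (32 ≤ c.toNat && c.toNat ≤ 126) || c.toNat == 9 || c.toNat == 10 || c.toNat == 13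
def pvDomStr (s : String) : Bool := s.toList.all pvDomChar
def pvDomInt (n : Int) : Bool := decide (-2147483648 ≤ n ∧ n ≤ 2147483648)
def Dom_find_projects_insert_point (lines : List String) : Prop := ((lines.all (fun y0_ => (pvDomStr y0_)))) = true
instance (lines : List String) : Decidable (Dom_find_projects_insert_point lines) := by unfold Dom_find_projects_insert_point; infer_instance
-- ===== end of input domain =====

-- B replaces A's single stateful scan (flag + break + running index) by a declarative
-- combination of three comprehension-built index lists over slices (objective: alternative).
-- Both programs are total and return the same value on every input.

-- line[0].isspace(); only consulted when the line is known non-empty (Python short-circuit)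
def pvFirstIsSpace (line : String) : Bool :=
  match PySem.Str.pyGet? line 0 with
  | some c => PySem.Chars.isspace c
  | none => false

-- ===== PORT A =====
-- A's for-loop with `in_projects`/`last_content_idx` state and `break`, as structural recursion
def pvLoopA (rest : List String) (i : Int) (inP : Bool) (last : Int) : Int :=
  match rest with
  | [] => last + 1
  | line :: t =>
    let stripped := PySem.Str.strip line
    if !inP then
      if PySem.Str.startswith stripped "projects:" && !(pvFirstIsSpace line) then
        pvLoopA t (i + 1) true i
      else
        pvLoopA t (i + 1) inP last
    else if decide (stripped ≠ "") && !(pvFirstIsSpace line) && !(PySem.Str.startswith stripped "- ") then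
      last + 1  -- break
    else if stripped ≠ "" then
      pvLoopA t (i + 1) inP i
    else
      pvLoopA t (i + 1) inP last

def find_projects_insert_point (lines : List String) : Int :=
  pvLoopA lines 0 false 0

-- ===== PORT B =====
-- B's own copy of the l[0].isspace() test (short-circuited behind a non-empty strip)
def pvFirstIsSpaceB (line : String) : Bool :=
  match PySem.Str.pyGet? line 0 with
  | some c => PySem.Chars.isspace c
  | none => false

-- [i for i, l in enumerate(xs) if p(l)] with enumerate counting from i0
def pvEnumIdx (xs : List String) (i0 : Int) (p : String → Bool) : List Int :=
  match xs with
  | [] => []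
  | x :: t => if p x then i0 :: pvEnumIdx t (i0 + 1) p else pvEnumIdx t (i0 + 1) p

def pvIsHdr (l : String) : Bool :=
  PySem.Str.startswith (PySem.Str.strip l) "projects:" && !(pvFirstIsSpaceB l)

def pvIsTerm (l : String) : Bool :=
  decide (PySem.Str.strip l ≠ "") && !(pvFirstIsSpaceB l) && !(PySem.Str.startswith (PySem.Str.strip l) "- ")

def pvIsContent (l : String) : Bool := decide (PySem.Str.strip l ≠ "")

def find_projects_insert_point_alt (lines : List String) : Int :=
  match pvEnumIdx lines 0 pvIsHdr with
  | [] => 1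
  | h :: _ =>
    let body := PySem.List.slice lines (some (h + 1)) none        -- lines[h+1:]
    let cut : Int :=
      match pvEnumIdx body 0 pvIsTerm with
      | [] => (body.length : Int)
      | e :: _ => e
    let content := pvEnumIdx (PySem.List.slice body none (some cut)) 0 pvIsContent  -- body[:cut]
    match content.getLast? with
    | some c => h + 1 + c + 1                                      -- content[-1]
    | none => h + 1

-- ===== PRECONDITION & SPEC =====
def Spec_find_projects_insert_point (lines : List String) (out : Int) : Prop := out = find_projects_insert_point_alt lines
instance (lines : List String) (out : Int) : Decidable (Spec_find_projects_insert_point lines out) := by unfold Spec_find_projects_insert_point; infer_instance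

-- ===== CLAIM (what is proved, stated in full; the proofs are below) =====
def Claim_equal_find_projects_insert_point : Prop := ∀ (lines : List String), Dom_find_projects_insert_point lines → Spec_find_projects_insert_point lines (find_projects_insert_point lines)

-- ===== LEMMAS AND PROOFS =====

theorem pvGetLast?_cons_ne {α : Type} (a : α) (l : List α) (h : l ≠ []) :
    (a :: l).getLast? = l.getLast? := by
  cases l with
  | nil => exact absurd rfl h
  | cons b t => rfl

-- relative index of the first terminator line, or the length if there is none
def pvCutN : List String → Nat
  | [] => 0
  | l :: t => if pvIsTerm l then 0 else pvCutN t + 1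

theorem pvFirstIsSpaceB_eq : pvFirstIsSpaceB = pvFirstIsSpace := rfl

-- one step of A's loop in the in_projects state, phrased with B's predicates
theorem pvLoopA_cons_true (line : String) (t : List String) (j last : Int) :
    pvLoopA (line :: t) j true last =
      if pvIsTerm line then last + 1
      else if PySem.Str.strip line ≠ "" then pvLoopA t (j + 1) true j
      else pvLoopA t (j + 1) true last := by
  simp only [pvLoopA, pvIsTerm, pvFirstIsSpaceB_eq, Bool.not_true, Bool.false_eq_true, if_false]
  rfl

-- one step of A's loop in the search state, phrased with B's predicate
theorem pvLoopA_cons_false (line : String) (t : List String) (i last : Int) :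
    pvLoopA (line :: t) i false last =
      if pvIsHdr line then pvLoopA t (i + 1) true i else pvLoopA t (i + 1) false last := by
  simp only [pvLoopA, pvIsHdr, pvFirstIsSpaceB_eq, Bool.not_false, if_true]
  rfl

theorem pvEnumIdx_shift (p : String → Bool) (xs : List String) : ∀ (i j : Int),
    pvEnumIdx xs i p = (pvEnumIdx xs j p).map (· + (i - j)) := by
  induction xs with
  | nil => intro i j; rfl
  | cons x t ih =>
    intro i j
    simp only [pvEnumIdx]
    split_ifs with hp
    · rw [ih (i + 1) (j + 1)]
      simp only [List.map_cons]
      refine congrArg₂ _ (by omega) ?_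
      apply List.map_congr_left; intro a _; omega
    · rw [ih (i + 1) (j + 1)]
      apply List.map_congr_left; intro a _; omega

theorem pvEnumIdx_ge (p : String → Bool) (xs : List String) : ∀ (i h : Int) (l : List Int),
    pvEnumIdx xs i p = h :: l → i ≤ h := by
  induction xs with
  | nil => intro i h l hx; simp [pvEnumIdx] at hx
  | cons x t ih =>
    intro i h l hx
    simp only [pvEnumIdx] at hx
    split_ifs at hx with hp
    · cases hx; omega
    · have := ih (i + 1) h l hx; omega

-- the first terminator index computed by B equals pvCutN
theorem pvEnumIdx_term_head (xs : List String) :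
    (pvEnumIdx xs 0 pvIsTerm = [] → pvCutN xs = xs.length) ∧
    (∀ e l, pvEnumIdx xs 0 pvIsTerm = e :: l → e = (pvCutN xs : Int)) := by
  have key : ∀ (ys : List String) (i : Int),
      (pvEnumIdx ys i pvIsTerm = [] → pvCutN ys = ys.length) ∧
      (∀ e l, pvEnumIdx ys i pvIsTerm = e :: l → e = i + (pvCutN ys : Int)) := by
    intro ys
    induction ys with
    | nil => intro i; exact ⟨fun _ => rfl, fun e l h => by simp [pvEnumIdx] at h⟩
    | cons y t ih =>
      intro i
      constructor
      · intro h
        simp only [pvEnumIdx] at h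
        split_ifs at h with hp
        · simp [pvCutN, hp, (ih (i + 1)).1 h]
      · intro e l h
        simp only [pvEnumIdx] at h
        split_ifs at h with hp
        · cases h; simp [pvCutN, hp]
        · have := (ih (i + 1)).2 e l h
          simp [pvCutN, hp]; omega
  refine ⟨(key xs 0).1, fun e l h => ?_⟩
  have := (key xs 0).2 e l h; omega

-- A's loop in the in_projects state, characterised by the last content index of the truncated body
theorem pvLoopA_true_char (rest : List String) : ∀ (j last : Int),
    pvLoopA rest j true last =
      match (pvEnumIdx (rest.take (pvCutN rest)) 0 pvIsContent).getLast? with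
      | some c => j + c + 1
      | none => last + 1 := by
  induction rest with
  | nil => intro j last; rfl
  | cons line t ih =>
    intro j last
    rw [pvLoopA_cons_true]
    by_cases hT : pvIsTerm line = true
    · rw [if_pos hT]
      simp [pvCutN, hT, pvEnumIdx]
    · rw [if_neg hT]
      have hcut : pvCutN (line :: t) = pvCutN t + 1 := by
        simp [pvCutN, hT]
      have htake : (line :: t).take (pvCutN (line :: t)) = line :: t.take (pvCutN t) := by
        rw [hcut]; rfl
      have hshift := pvEnumIdx_shift pvIsContent (t.take (pvCutN t)) (0 + 1) 0
      by_cases hC : PySem.Str.strip line ≠ ""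
      · have hC' : pvIsContent line = true := by simp [pvIsContent, hC]
        rw [if_pos hC, ih (j + 1) j, htake]
        simp only [pvEnumIdx, hC', if_pos, hshift]
        cases hL : (pvEnumIdx (t.take (pvCutN t)) 0 pvIsContent).getLast? with
        | none =>
          have : pvEnumIdx (t.take (pvCutN t)) 0 pvIsContent = [] :=
            List.getLast?_eq_none_iff.mp hL
          simp [this]
        | some c =>
          have hne : (pvEnumIdx (t.take (pvCutN t)) 0 pvIsContent).map (· + (0 + 1 - 0)) ≠ [] := by
            intro h0
            rw [List.map_eq_nil_iff.mp h0] at hL; simp at hL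
          rw [pvGetLast?_cons_ne _ _ hne, List.getLast?_map, hL]
          simp; omega
      · have hC' : pvIsContent line = false := by
          simp only [pvIsContent]; simpa using hC
        rw [if_neg hC, ih (j + 1) last, htake]
        simp only [pvEnumIdx, hC', Bool.false_eq_true, if_false, hshift]
        rw [List.getLast?_map]
        cases hL : (pvEnumIdx (t.take (pvCutN t)) 0 pvIsContent).getLast? with
        | none => simp
        | some c => simp; omega

-- A's loop in the search state, characterised by the first header index
theorem pvLoopA_false_char (lines : List String) : ∀ (i : Int),
    pvLoopA lines i false 0 =
      match pvEnumIdx lines i pvIsHdr with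
      | [] => 1
      | h :: _ => pvLoopA (lines.drop ((h - i).toNat + 1)) (h + 1) true h := by
  induction lines with
  | nil => intro i; rfl
  | cons line t ih =>
    intro i
    rw [pvLoopA_cons_false]
    by_cases hH : pvIsHdr line = true
    · rw [if_pos hH]
      simp only [pvEnumIdx, hH, if_pos]
      have : (i - i).toNat + 1 = 1 := by omega
      rw [this, List.drop_succ_cons, List.drop_zero]
    · rw [if_neg hH]
      rw [ih (i + 1)]
      have henum : pvEnumIdx (line :: t) i pvIsHdr = pvEnumIdx t (i + 1) pvIsHdr := by
        simp [pvEnumIdx, hH]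
      rw [henum]
      cases hE : pvEnumIdx t (i + 1) pvIsHdr with
      | nil => rfl
      | cons h l =>
        have hge : i + 1 ≤ h := pvEnumIdx_ge pvIsHdr t (i + 1) h l hE
        show pvLoopA (t.drop ((h - (i + 1)).toNat + 1)) (h + 1) true h
            = pvLoopA ((line :: t).drop ((h - i).toNat + 1)) (h + 1) true h
        have heq : (h - i).toNat + 1 = ((h - (i + 1)).toNat + 1) + 1 := by omega
        rw [heq, List.drop_succ_cons]

-- ===== VERDICT (by name: the statement is the Claim_ definition above) =====
theorem find_projects_insert_point_spec : Claim_equal_find_projects_insert_point := by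
  intro lines _
  unfold Spec_find_projects_insert_point find_projects_insert_point find_projects_insert_point_alt
  rw [pvLoopA_false_char lines 0]
  cases hE : pvEnumIdx lines 0 pvIsHdr with
  | nil => rfl
  | cons h l =>
    have hge : (0 : Int) ≤ h := pvEnumIdx_ge pvIsHdr lines 0 h l hE
    have hslice : PySem.List.slice lines (some (h + 1)) none = lines.drop ((h - 0).toNat + 1) := by
      rw [PySem.List.slice_from lines (show (0:Int) ≤ h + 1 by omega)]
      congr 1; omega
    show pvLoopA (lines.drop ((h - 0).toNat + 1)) (h + 1) true h =
      (match (pvEnumIdx (PySem.List.slice (PySem.List.slice lines (some (h + 1)) none) none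
          (some (match pvEnumIdx (PySem.List.slice lines (some (h + 1)) none) 0 pvIsTerm with
                 | [] => ((PySem.List.slice lines (some (h + 1)) none).length : Int)
                 | e :: _ => e))) 0 pvIsContent).getLast? with
       | some c => h + 1 + c + 1
       | none => h + 1)
    rw [hslice]
    set body := lines.drop ((h - 0).toNat + 1) with hbody
    rw [pvLoopA_true_char body (h + 1) h]
    have hterm := pvEnumIdx_term_head body
    have hcutI : (match pvEnumIdx body 0 pvIsTerm with
        | [] => (body.length : Int)
        | e :: _ => e) = (pvCutN body : Int) := by
      cases hT : pvEnumIdx body 0 pvIsTerm with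
      | nil => rw [hterm.1 hT]
      | cons e l2 => exact hterm.2 e l2 hT
    rw [hcutI]
    have hsl2 : PySem.List.slice body none (some ((pvCutN body : Int))) = body.take (pvCutN body) := by
      rw [PySem.List.slice_to body (show (0:Int) ≤ (pvCutN body : Int) by omega)]
      simp
    rw [hsl2]
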